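-- pv_equiv track=rewrite | github.com/grumpystrongman/LAM | lam/interface/learned_recipe.py | _click_purpose
-- ===== SOURCE A (Python) =====
-- def _click_purpose(label: str) -> str:
--     low = label.lower()
--     if any(token in low for token in ["submit", "save", "send"]):
--         return "Commit the current step"
--     if any(token in low for token in ["next", "continue", "open"]):
--         return "Move to the next screen or open a target"
--     if any(token in low for token in ["search", "filter"]):
--         return "Focus or trigger search and filtering"
--     return "Select the required UI control"
-- ===== SOURCE B (Python) =====
-- TOKEN_PRIORITY = {
--     "submit": 0, "save": 0, "send": 0,
--     "next": 1, "continue": 1, "open": 1,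
--     "search": 2, "filter": 2,
-- }
--
-- PURPOSES = [
--     "Commit the current step",
--     "Move to the next screen or open a target",
--     "Focus or trigger search and filtering",
--     "Select the required UI control",
-- ]
--
--
-- def _click_purpose(label: str) -> str:
--     low = label.lower()
--     best = min((p for t, p in TOKEN_PRIORITY.items() if t in low), default=3)
--     return PURPOSES[best]
-- ===== Notes on version B (the rewrite author's own statement) =====
-- stated objective: alternative
-- what changed: B flattens the categories into one token-to-priority map, computes the minimum priority over all matching tokens in a single pass (no early return, no per-category any()), and indexes a purposes array; A's first-match branch order equals the minimal category index.
import Mathlib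
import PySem

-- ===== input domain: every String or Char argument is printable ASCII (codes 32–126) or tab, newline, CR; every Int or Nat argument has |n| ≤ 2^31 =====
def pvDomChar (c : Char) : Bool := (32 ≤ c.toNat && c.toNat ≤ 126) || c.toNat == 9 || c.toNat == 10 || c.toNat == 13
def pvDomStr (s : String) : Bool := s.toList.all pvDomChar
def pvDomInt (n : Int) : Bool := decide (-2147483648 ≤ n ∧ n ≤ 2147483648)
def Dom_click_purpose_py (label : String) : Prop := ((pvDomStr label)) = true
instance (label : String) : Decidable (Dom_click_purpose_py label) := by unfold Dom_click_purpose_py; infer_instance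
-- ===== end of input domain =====

-- B: one flat token→priority map, minimum matching priority in a single pass, then index into a purposes array (alternative decomposition; same cost).

-- ===== PORT A =====
def click_purpose_py (label : String) : String :=
  let low := PySem.Str.lower label
  if ["submit", "save", "send"].any (fun token => PySem.Str.isIn token low) then
    "Commit the current step"
  else if ["next", "continue", "open"].any (fun token => PySem.Str.isIn token low) then
    "Move to the next screen or open a target"
  else if ["search", "filter"].any (fun token => PySem.Str.isIn token low) then
    "Focus or trigger search and filtering"
  else
    "Select the required UI control"

-- ===== PORT B =====
def clickTokenPriority : List (String × Nat) :=
  [("submit", 0), ("save", 0), ("send", 0),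
   ("next", 1), ("continue", 1), ("open", 1),
   ("search", 2), ("filter", 2)]

def clickPurposes : List String :=
  ["Commit the current step",
   "Move to the next screen or open a target",
   "Focus or trigger search and filtering",
   "Select the required UI control"]

def click_purpose_py_alt (label : String) : String :=
  let low := PySem.Str.lower label
  let best := clickTokenPriority.foldl
    (fun acc tp => if PySem.Str.isIn tp.1 low then min acc tp.2 else acc) 3
  clickPurposes.getD best "Select the required UI control"

-- ===== PRECONDITION & SPEC =====
def Spec_click_purpose_py (label : String) (out : String) : Prop := out = click_purpose_py_alt label
instance (label : String) (out : String) : Decidable (Spec_click_purpose_py label out) := by unfold Spec_click_purpose_py; infer_instance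

-- ===== CLAIM =====
def Claim_equal_click_purpose_py : Prop := ∀ (label : String), Dom_click_purpose_py label → Spec_click_purpose_py label (click_purpose_py label)

-- ===== LEMMAS AND PROOFS =====

-- ===== VERDICT =====
theorem click_purpose_py_spec : Claim_equal_click_purpose_py := by
  intro label _
  unfold Spec_click_purpose_py click_purpose_py click_purpose_py_alt clickTokenPriority clickPurposes
  simp only [List.any, List.foldl, Bool.or_eq_true]
  generalize PySem.Str.isIn "submit" (PySem.Str.lower label) = b1
  generalize PySem.Str.isIn "save" (PySem.Str.lower label) = b2
  generalize PySem.Str.isIn "send" (PySem.Str.lower label) = b3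
  generalize PySem.Str.isIn "next" (PySem.Str.lower label) = b4
  generalize PySem.Str.isIn "continue" (PySem.Str.lower label) = b5
  generalize PySem.Str.isIn "open" (PySem.Str.lower label) = b6
  generalize PySem.Str.isIn "search" (PySem.Str.lower label) = b7
  generalize PySem.Str.isIn "filter" (PySem.Str.lower label) = b8
  cases b1 <;> cases b2 <;> cases b3 <;> cases b4 <;> cases b5 <;> cases b6 <;> cases b7 <;> cases b8 <;> rfl
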